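-- pv_equiv track=rewrite | github.com/vibujithan/vasculature | Python/io/utilities.py | opt_chunksize
-- ===== SOURCE A (Python) =====
-- import math
--
-- def opt_chunksize(depth, xy_chunks=(256, 256), lower=200, upper=400):
--     if depth < lower:
--         chunk_d = depth
--     else:
--         divisor = 1
--         chunk_d = depth
--         while not (lower <= chunk_d < upper):
--             divisor += 1
--             chunk_d = math.ceil(depth / divisor)
--
--     return (chunk_d,) + xy_chunks
-- ===== SOURCE B (Python) =====
-- import math
--
-- def opt_chunksize(depth, xy_chunks=(256, 256), lower=200, upper=400):
--     # closed form: the smallest divisor giving a chunk < upper is ceil(depth/(upper-1))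
--     if depth < lower or lower <= depth < upper:
--         chunk_d = depth
--     else:
--         divisor = math.ceil(depth / (upper - 1))
--         chunk_d = math.ceil(depth / divisor)
--     return (chunk_d,) + xy_chunks
-- ===== Notes on version B (the rewrite author's own statement) =====
-- stated objective: alternative
-- what changed: replaces the trial-divisor while-loop by a closed-form computation of the minimal divisor, divisor = ceil(depth/(upper-1)), so no loop at all
import Mathlib
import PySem

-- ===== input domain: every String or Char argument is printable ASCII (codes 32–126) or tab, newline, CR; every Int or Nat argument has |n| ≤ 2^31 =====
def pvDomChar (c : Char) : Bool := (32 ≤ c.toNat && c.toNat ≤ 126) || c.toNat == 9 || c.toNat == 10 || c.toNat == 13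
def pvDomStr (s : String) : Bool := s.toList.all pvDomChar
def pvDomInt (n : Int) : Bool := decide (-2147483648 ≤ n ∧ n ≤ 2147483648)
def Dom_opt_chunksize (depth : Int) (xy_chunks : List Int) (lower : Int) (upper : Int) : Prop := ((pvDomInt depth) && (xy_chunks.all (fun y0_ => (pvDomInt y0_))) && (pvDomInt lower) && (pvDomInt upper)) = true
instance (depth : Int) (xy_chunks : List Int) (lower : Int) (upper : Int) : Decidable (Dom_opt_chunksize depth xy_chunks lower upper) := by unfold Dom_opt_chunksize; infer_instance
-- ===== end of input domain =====

-- B replaces A's trial-divisor loop by the closed form ceil(depth/(upper-1)); equal on all inputs where A terminates (Pre_).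

-- shared helper: Python's math.ceil(a / b) on exact arithmetic, i.e. ceiling division -((-a) // b)
def cdiv (a b : Int) : Int := -(PySem.Int.floordiv (-a) b)

-- ===== PORT A =====
-- A's while-loop with fuel; |depth|+2 iterations suffice whenever the Python loop terminates
-- (the loop's chunk value is constant from divisor = |depth|+1 on), so the fuel-out branch is
-- unreachable under Pre_.
def optA_loop (depth lower upper : Int) : Nat → Int → Int → Int
  | 0, _, chunk_d => chunk_d
  | fuel + 1, divisor, chunk_d =>
    if lower ≤ chunk_d ∧ chunk_d < upper then chunk_d
    else optA_loop depth lower upper fuel (divisor + 1) (cdiv depth (divisor + 1))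

def opt_chunksize (depth : Int) (xy_chunks : List Int) (lower : Int) (upper : Int) : List Int :=
  let chunk_d :=
    if depth < lower then depth
    else optA_loop depth lower upper (depth.natAbs + 2) 1 depth
  chunk_d :: xy_chunks

-- ===== PORT B =====
def opt_chunksize_alt (depth : Int) (xy_chunks : List Int) (lower : Int) (upper : Int) : List Int :=
  let chunk_d :=
    if depth < lower ∨ (lower ≤ depth ∧ depth < upper) then depth
    else
      let divisor := cdiv depth (upper - 1)
      cdiv depth divisor
  chunk_d :: xy_chunks

-- ===== PRECONDITION & SPEC =====
-- Pre_ excludes exactly the inputs on which A's while-loop never terminates (no divisor yields a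
-- chunk in [lower, upper)); on every such input A returns no value, and B (Python) may divide by 0.
def Pre_opt_chunksize (depth : Int) (xy_chunks : List Int) (lower : Int) (upper : Int) : Prop :=
  depth < lower ∨ (lower ≤ depth ∧ depth < upper) ∨
    (1 ≤ depth ∧ 2 ≤ upper ∧ lower ≤ cdiv depth (cdiv depth (upper - 1)))
instance (depth : Int) (xy_chunks : List Int) (lower : Int) (upper : Int) : Decidable (Pre_opt_chunksize depth xy_chunks lower upper) := by unfold Pre_opt_chunksize; infer_instance

def pvWitness_opt_chunksize : Int × List Int × Int × Int := (100, [256, 256], 200, 400)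

def Spec_opt_chunksize (depth : Int) (xy_chunks : List Int) (lower : Int) (upper : Int) (out : List Int) : Prop := out = opt_chunksize_alt depth xy_chunks lower upper
instance (depth : Int) (xy_chunks : List Int) (lower : Int) (upper : Int) (out : List Int) : Decidable (Spec_opt_chunksize depth xy_chunks lower upper out) := by unfold Spec_opt_chunksize; infer_instance

-- ===== CLAIM (what is proved, stated in full; the proofs are below) =====
def Claim_equal_opt_chunksize : Prop := ∀ (depth : Int) (xy_chunks : List Int) (lower : Int) (upper : Int), Dom_opt_chunksize depth xy_chunks lower upper → Pre_opt_chunksize depth xy_chunks lower upper → Spec_opt_chunksize depth xy_chunks lower upper (opt_chunksize depth xy_chunks lower upper)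

-- ===== LEMMAS AND PROOFS =====

-- bracket characterisation of ceiling division
theorem cdiv_bracket (a d : Int) (hd : 0 < d) :
    (cdiv a d - 1) * d < a ∧ a ≤ cdiv a d * d := by
  have h := (PySem.Int.neg_floordiv_neg_eq_iff_of_pos (a := a) (b := d) (q := cdiv a d) hd).mp rfl
  exact h

theorem cdiv_le_iff (a d b : Int) (hd : 0 < d) : cdiv a d ≤ b ↔ a ≤ d * b := by
  obtain ⟨h1, h2⟩ := cdiv_bracket a d hd
  constructor
  · intro h; nlinarith
  · intro h
    by_contra hb
    push_neg at hb
    have : b ≤ cdiv a d - 1 := by omega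
    nlinarith

theorem cdiv_one (a : Int) : cdiv a 1 = a := by
  simp [cdiv, PySem.Int.floordiv]

theorem cdiv_pos (a d : Int) (ha : 1 ≤ a) (hd : 0 < d) : 1 ≤ cdiv a d := by
  by_contra h
  push_neg at h
  have := (cdiv_le_iff a d 0 hd).mp (by omega)
  omega

-- the run of A's loop, from any divisor d between 1 and the exit divisor d0
theorem optA_loop_run (depth lower upper : Int) (d0 : Int)
    (ha : 1 ≤ depth) (hup : 1 ≤ upper - 1)
    (hd0 : d0 = cdiv depth (upper - 1))
    (hlow : lower ≤ cdiv depth d0) :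
    ∀ (fuel : Nat) (d : Int), 1 ≤ d → d ≤ d0 → (d0 - d).toNat < fuel →
      optA_loop depth lower upper fuel d (cdiv depth d) = cdiv depth d0 := by
  have hd0pos : 1 ≤ d0 := hd0 ▸ cdiv_pos depth (upper - 1) ha hup
  intro fuel
  induction fuel with
  | zero => intro d _ _ h; omega
  | succ n ih =>
    intro d hd1 hdd0 hfuel
    by_cases hstop : d = d0
    · have hbr : depth ≤ (upper - 1) * cdiv depth (upper - 1) :=
        (cdiv_le_iff depth (upper - 1) (cdiv depth (upper - 1)) hup).mp le_rfl
      have hlt : cdiv depth d < upper := by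
        have : cdiv depth d ≤ upper - 1 := by
          rw [cdiv_le_iff depth d (upper - 1) (by omega), hstop, hd0]
          linarith [mul_comm (upper - 1) (cdiv depth (upper - 1))]
        omega
      have hlow' : lower ≤ cdiv depth d := by rw [hstop]; exact hlow
      rw [← hstop]
      simp [optA_loop, hlow', hlt]
    · have hdlt : d < d0 := lt_of_le_of_ne hdd0 hstop
      have hbig : ¬ cdiv depth d < upper := by
        intro hlt
        have : cdiv depth d ≤ upper - 1 := by omega
        have : depth ≤ d * (upper - 1) := (cdiv_le_iff depth d (upper - 1) (by omega)).mp this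
        have : cdiv depth (upper - 1) ≤ d := by
          rw [cdiv_le_iff depth (upper - 1) d hup]; linarith [this, mul_comm d (upper - 1)]
        omega
      have : optA_loop depth lower upper (n + 1) d (cdiv depth d)
           = optA_loop depth lower upper n (d + 1) (cdiv depth (d + 1)) := by
        simp [optA_loop]
        intro _; exact fun h => absurd h hbig
      rw [this]
      exact ih (d + 1) (by omega) (by omega) (by omega)

theorem opt_chunksize_spec : Claim_equal_opt_chunksize := by
  intro depth xy_chunks lower upper _ hpre
  unfold Spec_opt_chunksize opt_chunksize opt_chunksize_alt
  by_cases h1 : depth < lower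
  · simp [h1]
  · by_cases h2 : depth < upper
    · -- first loop check succeeds immediately
      have hcond : lower ≤ depth ∧ depth < upper := ⟨by omega, h2⟩
      simp only [if_neg h1, if_pos (Or.inr hcond)]
      simp [optA_loop, hcond.1, hcond.2]
    · -- genuine loop: depth ≥ upper > lower; Pre_'s third disjunct gives the exit bound
      push_neg at h1 h2
      rcases hpre with h | h | ⟨hdpos, hup2, hlow⟩
      · omega
      · omega
      have hup : 1 ≤ upper - 1 := by omega
      set d0 := cdiv depth (upper - 1) with hd0
      have hd0pos : 1 ≤ d0 := cdiv_pos depth (upper - 1) hdpos (by omega)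
      have hd0le : d0 ≤ depth := by
        rw [hd0, cdiv_le_iff depth (upper - 1) depth hup]
        nlinarith
      have hnb : ¬ (depth < lower ∨ (lower ≤ depth ∧ depth < upper)) := by omega
      simp only [if_neg (by omega : ¬ depth < lower), if_neg hnb]
      have hfuel : (d0 - 1).toNat < depth.natAbs + 2 := by omega
      have hrun := optA_loop_run depth lower upper d0 hdpos hup hd0 hlow
        (depth.natAbs + 2) 1 le_rfl hd0pos hfuel
      rw [cdiv_one] at hrun
      rw [hrun]
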